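-- pv_equiv track=rewrite | github.com/mjandrew3/QIF-Parser | utils.py | parse_acct
-- ===== SOURCE A (Python) =====
-- def parse_acct(acct):
--     '''Parse Account details
--
--     '''
--     name = ''
--     acct_type = ''
--     desc = ''
--     limit = ''
--     bal_date = ''
--     bal_amt = ''
--     for line in acct:
--         match line[0]:
--             case 'N':
--                 #Name
--                 name = line[1:]
--             case 'T':
--                 #Account Type
--                 acct_type = line[1:]
--             case 'D':
--                 #Description
--                 desc = line[1:]
--             case 'L':
--                 #Credit Limit
--                 limit = line[1:]
--             case '/':
--                 #Statement Balance Date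
--                 bal_date = line[1:]
--             case '$':
--                 #Statement Balance Amount
--                 bal_amt = line[1:]
--     account = [name,acct_type,desc,limit,bal_date,bal_amt]
--     return account
-- ===== SOURCE B (Python) =====
-- def parse_acct(acct):
--     '''Parse Account details'''
--     rev = acct[::-1]
--
--     def last_field(key):
--         # first match in the reversed list = last occurrence in acct
--         for line in rev:
--             if line[0] == key:
--                 return line[1:]
--         return ''
--
--     return [last_field(k) for k in 'NTDL/$']
-- ===== Notes on version B (the rewrite author's own statement) =====
-- stated objective: alternative
-- what changed: Instead of one forward pass that dispatches on each line and overwrites six scalar accumulators, B reverses the list once and answers each of the six fields by an independent back-to-front scan that early-exits at the first (i.e. last-in-input) line with that tag, defaulting to ''.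
import Mathlib
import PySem

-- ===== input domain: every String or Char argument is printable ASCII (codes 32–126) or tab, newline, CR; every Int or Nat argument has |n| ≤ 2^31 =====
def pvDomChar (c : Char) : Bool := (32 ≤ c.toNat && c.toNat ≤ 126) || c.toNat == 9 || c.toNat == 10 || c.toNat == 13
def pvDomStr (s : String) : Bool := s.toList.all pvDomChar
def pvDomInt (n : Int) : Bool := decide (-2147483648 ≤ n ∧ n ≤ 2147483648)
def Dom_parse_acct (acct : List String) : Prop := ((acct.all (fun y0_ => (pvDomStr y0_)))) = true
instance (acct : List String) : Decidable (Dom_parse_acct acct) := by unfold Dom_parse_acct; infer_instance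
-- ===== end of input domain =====

-- B replaces A's single forward pass with six scalar accumulators by six
-- independent back-to-front scans with early exit (objective: alternative).

-- ===== PORT A =====
-- six-field loop state: (name, acct_type, desc, limit, bal_date, bal_amt)
def parseAcctStep (st : String × String × String × String × String × String)
    (line : String) : String × String × String × String × String × String :=
  match line.toList with
  | [] => st          -- Python raises IndexError here; excluded by Pre_parse_acct
  | c :: rest =>
    let t := String.ofList rest   -- line[1:]
    -- Python's 'match line[0]' on literal patterns = equality tests in order
    if c = 'N' then (t, st.2.1, st.2.2.1, st.2.2.2.1, st.2.2.2.2.1, st.2.2.2.2.2)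
    else if c = 'T' then (st.1, t, st.2.2.1, st.2.2.2.1, st.2.2.2.2.1, st.2.2.2.2.2)
    else if c = 'D' then (st.1, st.2.1, t, st.2.2.2.1, st.2.2.2.2.1, st.2.2.2.2.2)
    else if c = 'L' then (st.1, st.2.1, st.2.2.1, t, st.2.2.2.2.1, st.2.2.2.2.2)
    else if c = '/' then (st.1, st.2.1, st.2.2.1, st.2.2.2.1, t, st.2.2.2.2.2)
    else if c = '$' then (st.1, st.2.1, st.2.2.1, st.2.2.2.1, st.2.2.2.2.1, t)
    else st

def parse_acct (acct : List String) : List String :=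
  let s := acct.foldl parseAcctStep ("", "", "", "", "", "")
  [s.1, s.2.1, s.2.2.1, s.2.2.2.1, s.2.2.2.2.1, s.2.2.2.2.2]

-- ===== PORT B =====
-- last_field: scan the reversed list, return at the first line whose tag is key
def lastField (key : Char) : List String → String
  | [] => ""
  | l :: ls =>
    match l.toList with
    | [] => lastField key ls   -- Python raises IndexError here; excluded by Pre_parse_acct
    | c :: cs => if c = key then String.ofList cs else lastField key ls

def parse_acct_alt (acct : List String) : List String :=
  let rev := acct.reverse      -- acct[::-1]
  ['N', 'T', 'D', 'L', '/', '$'].map (fun k => lastField k rev)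

-- ===== PRECONDITION & SPEC =====
-- Pre_ excludes lists containing an empty string: there A (line[0]) raises IndexError.
def Pre_parse_acct (acct : List String) : Prop := ∀ l ∈ acct, l ≠ ""
instance (acct : List String) : Decidable (Pre_parse_acct acct) := by unfold Pre_parse_acct; infer_instance
def pvWitness_parse_acct : List String := ["NChecking", "TBank", "$100.00"]

def Spec_parse_acct (acct : List String) (out : List String) : Prop := out = parse_acct_alt acct
instance (acct : List String) (out : List String) : Decidable (Spec_parse_acct acct out) := by unfold Spec_parse_acct; infer_instance

-- ===== CLAIM (what is proved, stated in full; the proofs are below) =====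
def Claim_equal_parse_acct : Prop := ∀ (acct : List String), Dom_parse_acct acct → Pre_parse_acct acct → Spec_parse_acct acct (parse_acct acct)

-- ===== LEMMAS AND PROOFS =====
-- effect of one line on one field, as seen from the back
def oneLine (key : Char) (l : String) (d : String) : String :=
  match l.toList with
  | [] => d
  | c :: cs => if c = key then String.ofList cs else d

-- lastField with an explicit fallback value
def lastFieldD (key : Char) (ls : List String) (d : String) : String :=
  match ls with
  | [] => d
  | l :: ls =>
    match l.toList with
    | [] => lastFieldD key ls d
    | c :: cs => if c = key then String.ofList cs else lastFieldD key ls d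

theorem lastField_eq_D (key : Char) (ls : List String) :
    lastField key ls = lastFieldD key ls "" := by
  induction ls with
  | nil => rfl
  | cons l ls ih =>
    simp only [lastField, lastFieldD]
    cases l.toList with
    | nil => exact ih
    | cons c cs => by_cases h : c = key <;> simp [h, ih]

theorem lastFieldD_append_singleton (key : Char) (xs : List String) (l : String) (d : String) :
    lastFieldD key (xs ++ [l]) d = lastFieldD key xs (oneLine key l d) := by
  induction xs with
  | nil =>
    cases hl : l.toList <;> simp [lastFieldD, oneLine, hl]
  | cons x xs ih =>
    simp only [List.cons_append, lastFieldD]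
    cases x.toList with
    | nil => exact ih
    | cons c cs => by_cases h : c = key <;> simp [h, ih]

-- one step of A's fold updates each field exactly as oneLine does
theorem step_fields (st : String × String × String × String × String × String) (l : String) :
    parseAcctStep st l =
      (oneLine 'N' l st.1, oneLine 'T' l st.2.1, oneLine 'D' l st.2.2.1,
       oneLine 'L' l st.2.2.2.1, oneLine '/' l st.2.2.2.2.1, oneLine '$' l st.2.2.2.2.2) := by
  cases hl : l.toList with
  | nil => simp [parseAcctStep, oneLine, hl]
  | cons c cs =>
    simp only [parseAcctStep, oneLine, hl]
    split_ifs <;> simp_all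

-- A's six fold-state fields are back-to-front scans with the initial state as fallback
theorem foldl_fields (acct : List String)
    (st : String × String × String × String × String × String) :
    acct.foldl parseAcctStep st =
      (lastFieldD 'N' acct.reverse st.1, lastFieldD 'T' acct.reverse st.2.1,
       lastFieldD 'D' acct.reverse st.2.2.1, lastFieldD 'L' acct.reverse st.2.2.2.1,
       lastFieldD '/' acct.reverse st.2.2.2.2.1, lastFieldD '$' acct.reverse st.2.2.2.2.2) := by
  induction acct generalizing st with
  | nil => simp [lastFieldD]
  | cons l ls ih =>
    simp only [List.foldl_cons, List.reverse_cons, lastFieldD_append_singleton]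
    rw [ih, step_fields]

-- ===== VERDICT (by name: the statement is the Claim_ definition above) =====
theorem parse_acct_spec : Claim_equal_parse_acct := by
  intro acct _ _
  unfold Spec_parse_acct parse_acct parse_acct_alt
  rw [foldl_fields]
  simp [lastField_eq_D]
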